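-- pv_equiv track=rewrite | github.com/rachmanz/ChipperShipper | default.py | generate_key_stream_run
-- ===== SOURCE A (Python) =====
-- def generate_key_stream_run(plaintext, key):
--     key = key.upper().replace(" ", "")
--     key_stream = ""
--     i = 0
--     while len(key_stream) < len(plaintext):
--         key_stream += key[i % len(key)]
--         i += 1
--     return key_stream
-- ===== SOURCE B (Python) =====
-- def generate_key_stream_run(plaintext, key):
--     key = key.upper().replace(" ", "")
--     if not plaintext:
--         return ""
--     reps = len(plaintext) // len(key) + 1
--     return (key * reps)[:len(plaintext)]
-- ===== Notes on version B (the rewrite author's own statement) =====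
-- stated objective: faster
-- what changed: Replaces the character-by-character while loop with modular indexing and repeated string concatenation by a closed-form construction: repeat the normalized key ceil-many times and slice to the plaintext length.
import Mathlib
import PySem

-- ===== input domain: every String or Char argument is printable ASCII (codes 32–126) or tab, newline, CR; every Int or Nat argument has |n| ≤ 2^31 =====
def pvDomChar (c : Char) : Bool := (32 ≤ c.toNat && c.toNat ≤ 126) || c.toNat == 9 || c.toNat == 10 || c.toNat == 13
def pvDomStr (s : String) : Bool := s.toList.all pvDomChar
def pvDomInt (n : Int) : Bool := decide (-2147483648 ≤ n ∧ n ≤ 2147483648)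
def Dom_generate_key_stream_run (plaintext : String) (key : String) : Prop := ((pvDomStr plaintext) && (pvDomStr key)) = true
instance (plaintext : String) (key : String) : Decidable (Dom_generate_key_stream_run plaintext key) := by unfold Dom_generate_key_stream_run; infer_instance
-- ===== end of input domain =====

-- B replaces A's character-by-character while loop (repeated string concatenation) by repeating the normalized key and slicing; a timing run measured B faster.

-- ===== PORT A =====
-- the while loop: key_stream += key[i % len(key)]; pyGet? none = IndexError / ZeroDivisionError (excluded by Pre_)
def pvALoop (k : List Char) (n : Nat) (acc : List Char) (i : Int) : List Char :=
  if _h : acc.length < n then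
    match PySem.List.pyGet? k (PySem.Int.mod i (k.length : Int)) with
    | some c => pvALoop k n (acc ++ [c]) (i + 1)
    | none => acc
  else acc
termination_by n - acc.length
decreasing_by simp; omega

def generate_key_stream_run (plaintext : String) (key : String) : String :=
  let key' := PySem.Str.replace (PySem.Str.upper key) " " ""
  String.ofList (pvALoop key'.toList plaintext.toList.length [] 0)

-- ===== PORT B =====
def generate_key_stream_run_alt (plaintext : String) (key : String) : String :=
  let k := PySem.Str.replace (PySem.Str.upper key) " " ""
  if plaintext.toList = [] then ""
  else
    -- Python 'len(plaintext) // len(k)' on the nonnegative lengths = Nat division (k nonempty inside Pre_)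
    let reps : Nat := plaintext.toList.length / k.toList.length + 1
    -- 'k * reps' = flatten (replicate reps k); '[:len(plaintext)]' = PySem slice
    String.ofList (PySem.List.slice (List.flatten (List.replicate reps k.toList))
      none (some (plaintext.toList.length : Int)))

-- ===== PRECONDITION & SPEC =====
-- Pre_ excludes exactly the inputs where A raises ZeroDivisionError: a nonempty plaintext with a key
-- consisting only of spaces (the normalized key is empty, so 'i % len(key)' divides by zero).
def Pre_generate_key_stream_run (plaintext : String) (key : String) : Prop :=
  plaintext.toList = [] ∨ key.toList.any (fun c => !(c == ' ')) = true
instance (plaintext : String) (key : String) : Decidable (Pre_generate_key_stream_run plaintext key) := by unfold Pre_generate_key_stream_run; infer_instance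

def pvWitness_generate_key_stream_run : String × String := ("attack at dawn", "Le mon")

def Spec_generate_key_stream_run (plaintext : String) (key : String) (out : String) : Prop := out = generate_key_stream_run_alt plaintext key
instance (plaintext : String) (key : String) (out : String) : Decidable (Spec_generate_key_stream_run plaintext key out) := by unfold Spec_generate_key_stream_run; infer_instance

-- ===== CLAIM (what is proved, stated in full; the proofs are below) =====
def Claim_equal_generate_key_stream_run : Prop := ∀ (plaintext : String) (key : String), Dom_generate_key_stream_run plaintext key → Pre_generate_key_stream_run plaintext key → Spec_generate_key_stream_run plaintext key (generate_key_stream_run plaintext key)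

-- ===== LEMMAS AND PROOFS =====

-- the common characterization: n characters of the key cycle starting at position j
def pvCyc (k : List Char) : Nat → Nat → List Char
  | 0, _ => []
  | m+1, j => k.getD (j % k.length) ' ' :: pvCyc k m (j+1)

theorem pvCyc_getElem? (k : List Char) (hk : k ≠ []) :
    ∀ (m j t : Nat), (pvCyc k m j)[t]? = if t < m then k[(j + t) % k.length]? else none := by
  intro m
  induction m with
  | zero => intro j t; simp [pvCyc]
  | succ m ih =>
    intro j t
    have hkl : 0 < k.length := List.length_pos_iff.mpr hk
    cases t with
    | zero =>
      simp [pvCyc, List.getD_eq_getElem?_getD, List.getElem?_eq_getElem (Nat.mod_lt _ hkl)]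
    | succ t =>
      simp only [pvCyc, List.getElem?_cons_succ, ih]
      have : j + 1 + t = j + (t + 1) := by omega
      rw [this]
      by_cases h : t < m <;> simp [h]

theorem pvFlat_getElem? (k : List Char) :
    ∀ (reps t : Nat), t < reps * k.length →
      (List.flatten (List.replicate reps k))[t]? = k[t % k.length]? := by
  intro reps
  induction reps with
  | zero => intro t ht; omega
  | succ reps ih =>
    intro t ht
    rw [List.replicate_succ, List.flatten_cons]
    by_cases h : t < k.length
    · rw [List.getElem?_append_left h, Nat.mod_eq_of_lt h]
    · push Not at h
      have ht' : t - k.length < reps * k.length := by rw [Nat.succ_mul] at ht; omega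
      rw [List.getElem?_append_right h, ih (t - k.length) ht', Nat.mod_eq_sub_mod h]

theorem pvALoop_cyc (k : List Char) (hk : k ≠ []) (n : Nat) :
    ∀ (m : Nat) (acc : List Char), n - acc.length = m →
      pvALoop k n acc (acc.length : Int) = acc ++ pvCyc k m acc.length := by
  intro m
  induction m with
  | zero =>
    intro acc hm
    rw [pvALoop]
    simp [pvCyc, show ¬ acc.length < n by omega]
  | succ m ih =>
    intro acc hm
    have hkl : 0 < k.length := List.length_pos_iff.mpr hk
    have hlt : acc.length < n := by omega
    have hidx : acc.length % k.length < k.length := Nat.mod_lt _ hkl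
    rw [pvALoop]
    simp only [hlt, dif_pos, PySem.Int.mod_natCast, PySem.List.pyGet?_natCast,
      List.getElem?_eq_getElem hidx]
    have hcast : (acc.length : Int) + 1 = ((acc ++ [k[acc.length % k.length]]).length : Int) := by
      simp
    rw [hcast, ih (acc ++ [k[acc.length % k.length]]) (by simp; omega)]
    simp [pvCyc, List.getD_eq_getElem?_getD, List.getElem?_eq_getElem hidx]

-- the while loop going through 'replace.go' with pattern " " and replacement "" is a filter
theorem pvGo_filter :
    ∀ (l : List Char) (fuel : Nat) (acc : List Char), l.length ≤ fuel →
      PySem.Chars.replace.go [' '] [] fuel l acc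
        = acc.reverse ++ l.filter (fun c => !(c == ' ')) := by
  intro l
  induction l with
  | nil =>
    intro fuel acc _
    rw [PySem.Chars.replace.go.eq_def]
    cases fuel <;> simp
  | cons c t ih =>
    intro fuel acc hf
    cases fuel with
    | zero => simp at hf
    | succ f =>
      rw [PySem.Chars.replace.go.eq_def]
      simp only [List.isPrefixOf, Bool.and_true]
      by_cases hc : c = ' '
      · subst hc
        simp only [beq_self_eq_true, if_pos, List.filter_cons,
          show List.drop [' '].length (' ' :: t) = t from rfl, List.reverse_nil, List.nil_append]
        rw [ih f acc (by simp at hf; omega)]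
        simp
      · have hbeq : (' ' == c) = false := beq_eq_false_iff_ne.mpr (Ne.symm hc)
        simp only [hbeq, Bool.false_eq_true, if_false, List.filter_cons]
        rw [ih f (c :: acc) (by simp at hf; omega)]
        simp [hc]

theorem pvReplace_filter (s : List Char) :
    PySem.Chars.replace s [' '] [] = s.filter (fun c => !(c == ' ')) := by
  rw [PySem.Chars.replace]
  simp [pvGo_filter s s.length [] (le_refl _)]

theorem pvNorm_toList (key : String) :
    (PySem.Str.replace (PySem.Str.upper key) " " "").toList
      = (key.toList.map PySem.Chars.upperChar).filter (fun c => !(c == ' ')) := by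
  rw [PySem.Str.toList_replace, PySem.Str.toList_upper,
    show (" " : String).toList = [' '] from rfl, show ("" : String).toList = [] from rfl,
    pvReplace_filter, PySem.Chars.upper]

theorem pvUpperChar_ne_space (c : Char) (hc : c ≠ ' ') : PySem.Chars.upperChar c ≠ ' ' := by
  rw [PySem.Chars.upperChar]
  split
  · rename_i h
    rw [PySem.Chars.islower] at h
    simp only [Bool.and_eq_true, decide_eq_true_eq] at h
    intro hcontra
    have h1 : 97 ≤ c.toNat := h.1
    have h2 : c.toNat ≤ 122 := h.2
    have hthis : (Char.ofNat (c.toNat - 32)).toNat = 32 := by rw [hcontra]; rfl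
    have hv : (c.toNat - 32).isValidChar := Or.inl (by omega)
    rw [Char.toNat_ofNat, if_pos hv] at hthis
    omega
  · exact hc

theorem pvNorm_ne_nil (key : String)
    (h : key.toList.any (fun c => !(c == ' ')) = true) :
    (PySem.Str.replace (PySem.Str.upper key) " " "").toList ≠ [] := by
  rw [pvNorm_toList]
  obtain ⟨c, hc, hcs⟩ := List.any_eq_true.mp h
  have hcs' : c ≠ ' ' := by simpa using hcs
  apply List.ne_nil_of_mem (a := PySem.Chars.upperChar c)
  rw [List.mem_filter]
  exact ⟨List.mem_map_of_mem hc, by simpa using pvUpperChar_ne_space c hcs'⟩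

theorem pvTake_flat_cyc (k : List Char) (hk : k ≠ []) (n : Nat) :
    List.take n (List.flatten (List.replicate (n / k.length + 1) k)) = pvCyc k n 0 := by
  have hkl : 0 < k.length := List.length_pos_iff.mpr hk
  apply List.ext_getElem?
  intro t
  rw [List.getElem?_take, pvCyc_getElem? k hk]
  by_cases h : t < n
  · have hdm := Nat.div_add_mod n k.length
    have hml : n % k.length < k.length := Nat.mod_lt _ hkl
    have htlt : t < (n / k.length + 1) * k.length := by
      rw [show (n / k.length + 1) * k.length = k.length * (n / k.length) + k.length from by ring]
      omega
    rw [if_pos h, if_pos h, pvFlat_getElem? k _ t htlt]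
    simp
  · rw [if_neg h, if_neg h]

-- ===== VERDICT (by name: the statement is the Claim_ definition above) =====
theorem generate_key_stream_run_spec : Claim_equal_generate_key_stream_run := by
  intro plaintext key _hdom hpre
  unfold Spec_generate_key_stream_run
  by_cases hp : plaintext.toList = []
  · simp [generate_key_stream_run, generate_key_stream_run_alt, hp, pvALoop]
  · rcases hpre with hpre | hany
    · exact absurd hpre hp
    have hk : (PySem.Str.replace (PySem.Str.upper key) " " "").toList ≠ [] :=
      pvNorm_ne_nil key hany
    simp only [generate_key_stream_run, generate_key_stream_run_alt, if_neg hp]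
    have e1 : pvALoop (PySem.Str.replace (PySem.Str.upper key) " " "").toList
        plaintext.toList.length [] 0 = pvCyc (PySem.Str.replace (PySem.Str.upper key) " " "").toList
        plaintext.toList.length 0 := by
      have := pvALoop_cyc (PySem.Str.replace (PySem.Str.upper key) " " "").toList hk
        plaintext.toList.length plaintext.toList.length [] (by simp)
      simpa using this
    rw [e1, PySem.List.slice_to_natCast,
      pvTake_flat_cyc (PySem.Str.replace (PySem.Str.upper key) " " "").toList hk]
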